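-- pv_equiv track=rewrite | github.com/nathan-lindstedt/randomization_tests | benchmarks/profile_dedup.py | _classify_two_stage
-- ===== SOURCE A (Python) =====
-- import math
--
-- def _classify_two_stage(G: int, cell_sizes: list[int]) -> str:
--     _LEHMER_THRESHOLD = 50_000
--     if len(set(cell_sizes)) != 1 or G > 10:
--         return "hash-dedup"
--     within_exact = 1
--     for s in cell_sizes:
--         within_exact *= math.factorial(s)
--         if within_exact > _LEHMER_THRESHOLD:
--             return "hash-dedup"
--     if math.factorial(G) * within_exact <= _LEHMER_THRESHOLD:
--         return "lehmer"
--     return "hash-dedup"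
-- ===== SOURCE B (Python) =====
-- import math
--
-- def _classify_two_stage(G: int, cell_sizes: list[int]) -> str:
--     _LEHMER_THRESHOLD = 50_000
--     if len(set(cell_sizes)) != 1 or G > 10:
--         return "hash-dedup"
--     # all cell sizes are equal here, so the within-cell count is a single power
--     within = math.factorial(cell_sizes[0]) ** len(cell_sizes)
--     if math.factorial(G) * within <= _LEHMER_THRESHOLD:
--         return "lehmer"
--     return "hash-dedup"
-- ===== Notes on version B (the rewrite author's own statement) =====
-- stated objective: simpler
-- what changed: Replaces the accumulating product loop with early exit by a closed-form power factorial(cell_sizes[0]) ** len(cell_sizes) (valid because the guard ensures all cell sizes are equal), collapsing the two threshold checks into one (safe because factorial(G) >= 1).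
-- outside the precondition, e.g. on _classify_two_stage(-1, [9, 9]): A returns 'hash-dedup', B raises ValueError
import Mathlib
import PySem

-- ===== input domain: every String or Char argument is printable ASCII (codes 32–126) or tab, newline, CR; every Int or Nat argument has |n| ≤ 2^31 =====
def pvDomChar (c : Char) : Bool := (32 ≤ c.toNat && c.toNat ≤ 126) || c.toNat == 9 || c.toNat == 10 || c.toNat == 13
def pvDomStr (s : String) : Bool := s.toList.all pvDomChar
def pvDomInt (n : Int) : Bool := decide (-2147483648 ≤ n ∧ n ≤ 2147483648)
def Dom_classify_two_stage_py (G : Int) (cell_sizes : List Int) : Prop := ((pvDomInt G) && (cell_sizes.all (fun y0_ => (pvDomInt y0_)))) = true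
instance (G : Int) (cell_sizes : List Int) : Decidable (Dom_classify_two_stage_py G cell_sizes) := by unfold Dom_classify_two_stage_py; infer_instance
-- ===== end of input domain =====

-- B replaces A's accumulating-product loop (with early exit) by the closed-form power
-- factorial(cell_sizes[0]) ** len(cell_sizes) and a single threshold check: simpler.

-- math.factorial on a nonnegative int (Python raises ValueError for n < 0; Pre_ excludes those calls)
def pyFactorial (n : Int) : Int := (Nat.factorial n.toNat : Int)

-- ===== PORT A =====
-- the 'for s in cell_sizes' loop of A: multiply factorials into the accumulator,
-- early-exit (none = returned "hash-dedup") as soon as it exceeds the threshold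
def dedupLoopA : List Int → Int → Option Int
  | [], acc => some acc
  | s :: rest, acc =>
    let acc' := acc * pyFactorial s
    if acc' > 50000 then none else dedupLoopA rest acc'

def classify_two_stage_py (G : Int) (cell_sizes : List Int) : String :=
  if (PySem.Set.ofList cell_sizes).length ≠ 1 ∨ G > 10 then "hash-dedup"
  else
    match dedupLoopA cell_sizes 1 with
    | none => "hash-dedup"
    | some within_exact =>
      if pyFactorial G * within_exact ≤ 50000 then "lehmer" else "hash-dedup"

-- ===== PORT B =====
def classify_two_stage_py_alt (G : Int) (cell_sizes : List Int) : String :=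
  if (PySem.Set.ofList cell_sizes).length ≠ 1 ∨ G > 10 then "hash-dedup"
  else
    -- cell_sizes[0]: the list is nonempty here (its set has exactly one element)
    let within := pyFactorial (cell_sizes.headD 0) ^ cell_sizes.length
    if pyFactorial G * within ≤ 50000 then "lehmer" else "hash-dedup"

-- ===== PRECONDITION & SPEC =====
-- Pre_ excludes exactly the inputs on which the second stage is reached (all cell sizes
-- equal and G ≤ 10) with a negative G or negative cell sizes: there math.factorial raises
-- ValueError in B (and in A, except that A's early exit can return "hash-dedup" before
-- reaching factorial(G) — an accidental escape B does not share).
def Pre_classify_two_stage_py (G : Int) (cell_sizes : List Int) : Prop :=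
  ((PySem.Set.ofList cell_sizes).length = 1 ∧ G ≤ 10) → (0 ≤ G ∧ ∀ s ∈ cell_sizes, 0 ≤ s)
instance (G : Int) (cell_sizes : List Int) : Decidable (Pre_classify_two_stage_py G cell_sizes) := by unfold Pre_classify_two_stage_py; infer_instance

def pvWitness_classify_two_stage_py : Int × List Int := (3, [2, 2, 2])

def Spec_classify_two_stage_py (G : Int) (cell_sizes : List Int) (out : String) : Prop := out = classify_two_stage_py_alt G cell_sizes
instance (G : Int) (cell_sizes : List Int) (out : String) : Decidable (Spec_classify_two_stage_py G cell_sizes out) := by unfold Spec_classify_two_stage_py; infer_instance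

-- ===== CLAIM (what is proved, stated in full; the proofs are below) =====
def Claim_equal_classify_two_stage_py : Prop := ∀ (G : Int) (cell_sizes : List Int), Dom_classify_two_stage_py G cell_sizes → Pre_classify_two_stage_py G cell_sizes → Spec_classify_two_stage_py G cell_sizes (classify_two_stage_py G cell_sizes)

-- ===== LEMMAS AND PROOFS =====

theorem one_le_pyFactorial (n : Int) : 1 ≤ pyFactorial n := by
  unfold pyFactorial; exact_mod_cast Nat.factorial_pos n.toNat

theorem one_le_prod_fact (cs : List Int) : 1 ≤ (cs.map pyFactorial).prod := by
  induction cs with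
  | nil => simp
  | cons s rest ih =>
    simp only [List.map_cons, List.prod_cons]
    have h1 := one_le_pyFactorial s
    nlinarith

-- A's loop computes the full product when it stays within the threshold, none otherwise
theorem dedupLoopA_eq (cs : List Int) : ∀ acc : Int, 1 ≤ acc → acc ≤ 50000 →
    dedupLoopA cs acc =
      if acc * (cs.map pyFactorial).prod ≤ 50000
      then some (acc * (cs.map pyFactorial).prod) else none := by
  induction cs with
  | nil => intro acc h1 h2; simp [dedupLoopA, h2]
  | cons s rest ih =>
    intro acc h1 h2
    have hf := one_le_pyFactorial s
    have hr := one_le_prod_fact rest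
    have hacc' : 1 ≤ acc * pyFactorial s := by nlinarith
    simp only [dedupLoopA, List.map_cons, List.prod_cons]
    by_cases hb : acc * pyFactorial s > 50000
    · have : ¬ acc * (pyFactorial s * (rest.map pyFactorial).prod) ≤ 50000 := by nlinarith
      simp [hb, this]
    · push Not at hb
      rw [if_neg (by omega)]
      rw [ih _ hacc' hb]
      rw [mul_assoc]

-- if set(cs) has exactly one element a, every element of cs equals a and cs is nonempty
theorem ofList_length_one (cs : List Int) (h : (PySem.Set.ofList cs).length = 1) :
    ∃ a, cs ≠ [] ∧ (∀ x ∈ cs, x = a) := by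
  match hs : PySem.Set.ofList cs with
  | [] => rw [hs] at h; simp at h
  | [a] =>
    refine ⟨a, ?_, ?_⟩
    · intro hnil; subst hnil; simp [PySem.Set.ofList] at hs
    · intro x hx
      have : x ∈ PySem.Set.ofList cs := (PySem.Set.mem_ofList cs x).2 hx
      rw [hs] at this; simpa using this
  | a :: b :: t => rw [hs] at h; simp at h

theorem prod_fact_all_eq (cs : List Int) (a : Int) (h : ∀ x ∈ cs, x = a) :
    (cs.map pyFactorial).prod = pyFactorial a ^ cs.length := by
  induction cs with
  | nil => simp
  | cons s rest ih =>
    have hs : s = a := h s (by simp)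
    have := ih (fun x hx => h x (by simp [hx]))
    simp [hs, this, pow_succ, mul_comm]

-- ===== VERDICT (by name: the statement is the Claim_ definition above) =====
theorem classify_two_stage_py_spec : Claim_equal_classify_two_stage_py := by
  intro G cs _hdom hpre
  unfold Spec_classify_two_stage_py classify_two_stage_py classify_two_stage_py_alt
  by_cases hg : (PySem.Set.ofList cs).length ≠ 1 ∨ G > 10
  · simp only [if_pos hg]
  · simp only [if_neg hg]
    push Not at hg
    obtain ⟨hlen, _hG10⟩ := hg
    obtain ⟨a, hne, hall⟩ := ofList_length_one cs hlen
    have hhead : cs.headD 0 = a := by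
      match cs, hne with
      | x :: _, _ => exact hall x (by simp)
    have hprod : (cs.map pyFactorial).prod = pyFactorial (cs.headD 0) ^ cs.length := by
      rw [hhead]; exact prod_fact_all_eq cs a hall
    rw [dedupLoopA_eq cs 1 le_rfl (by norm_num), one_mul]
    have hGf := one_le_pyFactorial G
    have hpf := one_le_prod_fact cs
    by_cases hle : (cs.map pyFactorial).prod ≤ 50000
    · simp only [if_pos hle, ← hprod]
    · have : ¬ pyFactorial G * (pyFactorial (cs.headD 0) ^ cs.length) ≤ 50000 := by
        rw [← hprod]; nlinarith
      simp only [if_neg hle]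
      rw [if_neg this]
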